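-- pv_equiv track=rewrite | github.com/Dospalko/AnnotationTool | backend/routes/extract.py | move_solo_opening_tags_to_next_line
-- ===== SOURCE A (Python) =====
-- def move_solo_opening_tags_to_next_line(text, tags):
--     # Split the text into lines
--     lines = text.split('\n')
--
--     # Function to process lines recursively
--     def recursive_move(lines, tags):
--         modified_lines = []
--         carry_forward_tag = None  # To carry forward a tag to the next non-blank line
--
--         for i, line in enumerate(lines):
--             line_strip = line.strip()
--             is_solo_tag_line = any(line_strip == f"<{tag}>" for tag in tags)
--
--             if is_solo_tag_line:
--                 # If the line contains a solo opening tag, carry it forward to be prefixed to the next line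
--                 carry_forward_tag = line_strip
--                 continue  # Skip adding this line to modified_lines
--
--             if carry_forward_tag:
--                 # If there's a tag to carry forward, prefix it to this line
--                 line = f"{carry_forward_tag}{line}"
--                 carry_forward_tag = None  # Reset after moving the tag
--
--             modified_lines.append(line)
--
--         # After processing all lines, check if any tag is still to be moved (case of the last line being a solo tag line)
--         if carry_forward_tag:
--             # Add the carried tag as a new line if no suitable next line was found
--             modified_lines.append(carry_forward_tag)
--
--         # Check if modifications were made; if yes, there might be more tags to move
--         if len(modified_lines) != len(lines):
--             return recursive_move(modified_lines, tags)
--         else: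
--             return modified_lines  # No modifications made; return the lines
--
--     # Start the recursive moving process
--     processed_lines = recursive_move(lines, tags)
--
--     # Join the processed lines back into a single text string
--     return "\n".join(processed_lines)
-- ===== SOURCE B (Python) =====
-- def move_solo_opening_tags_to_next_line(text, tags):
--     tag_set = {"<" + t + ">" for t in tags}
--
--     def one_pass(lines):
--         out = []
--         i, n = 0, len(lines)
--         while i < n:
--             s = lines[i].strip()
--             if s in tag_set:
--                 # skip to the last solo tag of this run (earlier ones are overwritten)
--                 while i + 1 < n and lines[i + 1].strip() in tag_set:
--                     i += 1
--                     s = lines[i].strip()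
--                 if i + 1 < n:
--                     out.append(s + lines[i + 1])
--                     i += 2
--                 else:
--                     out.append(s)
--                     i = n
--             else:
--                 out.append(lines[i])
--                 i += 1
--         return out
--
--     lines = text.split('\n')
--     while True:
--         new_lines = one_pass(lines)
--         if len(new_lines) == len(lines):
--             return "\n".join(new_lines)
--         lines = new_lines
-- ===== Notes on version B (the rewrite author's own statement) =====
-- stated objective: alternative
-- what changed: A's pass keeps a carry_forward_tag variable and repeats via self-recursion; B's pass has no carry: it skips a run of consecutive solo-tag lines to its last member and merges it with the lookahead line, and the repetition is an explicit length-fixed-point while loop over a prebuilt set of '<tag>' strings.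
import Mathlib
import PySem

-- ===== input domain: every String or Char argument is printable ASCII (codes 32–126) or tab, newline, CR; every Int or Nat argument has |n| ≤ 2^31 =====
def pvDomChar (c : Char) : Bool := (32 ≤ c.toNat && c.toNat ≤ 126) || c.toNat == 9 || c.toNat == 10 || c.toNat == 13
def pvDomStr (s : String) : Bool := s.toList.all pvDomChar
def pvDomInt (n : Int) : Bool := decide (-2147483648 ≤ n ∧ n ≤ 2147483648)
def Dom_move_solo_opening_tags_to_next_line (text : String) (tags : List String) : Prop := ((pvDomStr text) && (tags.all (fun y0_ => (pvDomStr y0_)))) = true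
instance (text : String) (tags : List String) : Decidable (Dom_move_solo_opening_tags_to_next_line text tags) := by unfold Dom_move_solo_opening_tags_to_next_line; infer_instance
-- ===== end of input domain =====

-- B replaces A's carry-variable pass and self-recursion by a run-skipping lookahead pass
-- (a set of "<tag>" strings built once) iterated by a fixed-point loop (objective: alternative).


-- ===== PORT A =====
-- any(line_strip == f"<{tag}>" for tag in tags); lines handled as List Char (PySem.Chars)
def pvSoloA (tags : List String) (s : List Char) : Bool :=
  tags.any (fun tag => s == '<' :: tag.toList ++ ['>'])

-- A's inner for-loop: state = carry_forward_tag (Option (List Char)); the trailing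
-- 'if carry_forward_tag: modified_lines.append(...)' is the [] case (carry is
-- always "<...>", never the falsy empty string).
def pvMoveA (tags : List String) : Option (List Char) → List (List Char) → List (List Char)
  | some t, [] => [t]
  | none, [] => []
  | c, l :: ls =>
    let s := PySem.Chars.strip l
    if pvSoloA tags s then pvMoveA tags (some s) ls
    else
      match c with
      | some t => (t ++ l) :: pvMoveA tags none ls
      | none => l :: pvMoveA tags none ls

-- recursive_move; fuel only makes the self-recursion total (each recursive call
-- strictly shrinks the list, so fuel = length + 1 is never exhausted).
def pvRecA (tags : List String) : Nat → List (List Char) → List (List Char)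
  | 0, lines => lines
  | fuel + 1, lines =>
    let m := pvMoveA tags none lines
    if m.length ≠ lines.length then pvRecA tags fuel m else m

def move_solo_opening_tags_to_next_line (text : String) (tags : List String) : String :=
  let lines := PySem.Chars.splitOn text.toList ['\n']
  String.ofList (PySem.Chars.join ['\n'] (pvRecA tags (lines.length + 1) lines))

-- ===== PORT B =====
-- one_pass: run-skipping lookahead, no carry variable; the index-advancing while
-- loop becomes recursion consuming one or two lines per step.
def pvPassB (tagSet : PySem.Set (List Char)) : List (List Char) → List (List Char)
  | [] => []
  | [l] =>
    let s := PySem.Chars.strip l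
    if PySem.Set.contains tagSet s then [s] else [l]
  | l :: l2 :: rest =>
    let s := PySem.Chars.strip l
    if PySem.Set.contains tagSet s then
      if PySem.Set.contains tagSet (PySem.Chars.strip l2) then pvPassB tagSet (l2 :: rest)
      else (s ++ l2) :: pvPassB tagSet rest
    else l :: pvPassB tagSet (l2 :: rest)

-- 'while True' fixed-point loop; fuel only makes it total (the list shrinks
-- strictly before each iteration, so fuel = length + 1 is never exhausted).
def pvLoopB (tagSet : PySem.Set (List Char)) : Nat → List (List Char) → List (List Char)
  | 0, lines => lines
  | fuel + 1, lines =>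
    let m := pvPassB tagSet lines
    if m.length = lines.length then m else pvLoopB tagSet fuel m

def move_solo_opening_tags_to_next_line_alt (text : String) (tags : List String) : String :=
  let tagSet := PySem.Set.ofList (tags.map (fun t => '<' :: t.toList ++ ['>']))
  let lines := PySem.Chars.splitOn text.toList ['\n']
  String.ofList (PySem.Chars.join ['\n'] (pvLoopB tagSet (lines.length + 1) lines))

-- ===== PRECONDITION & SPEC =====
def Spec_move_solo_opening_tags_to_next_line (text : String) (tags : List String) (out : String) : Prop := out = move_solo_opening_tags_to_next_line_alt text tags
instance (text : String) (tags : List String) (out : String) : Decidable (Spec_move_solo_opening_tags_to_next_line text tags out) := by unfold Spec_move_solo_opening_tags_to_next_line; infer_instance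

-- ===== CLAIM (what is proved, stated in full; the proofs are below) =====
def Claim_equal_move_solo_opening_tags_to_next_line : Prop := ∀ (text : String) (tags : List String), Dom_move_solo_opening_tags_to_next_line text tags → Spec_move_solo_opening_tags_to_next_line text tags (move_solo_opening_tags_to_next_line text tags)

-- ===== LEMMAS AND PROOFS =====

-- membership in B's set of "<tag>" strings is A's any-equality test
lemma solo_mem (tags : List String) (s : List Char) :
    s ∈ PySem.Set.ofList (tags.map (fun t => '<' :: t.toList ++ ['>'])) ↔
      pvSoloA tags s = true := by
  rw [PySem.Set.mem_ofList]
  simp only [List.mem_map, pvSoloA, List.any_eq_true, beq_iff_eq]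
  constructor
  · rintro ⟨t, ht, rfl⟩; exact ⟨t, ht, rfl⟩
  · rintro ⟨t, ht, rfl⟩; exact ⟨t, ht, rfl⟩

-- the two passes agree (joint statement, induction on length)
lemma pass_eq (tags : List String) (tagSet : PySem.Set (List Char))
    (hset : ∀ s, s ∈ tagSet ↔ pvSoloA tags s = true) :
    ∀ n, ∀ ls : List (List Char), ls.length = n →
      (pvMoveA tags none ls = pvPassB tagSet ls) ∧
      (∀ l, pvSoloA tags (PySem.Chars.strip l) = true →
        pvMoveA tags (some (PySem.Chars.strip l)) ls = pvPassB tagSet (l :: ls)) := by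
  intro n
  induction n with
  | zero =>
    intro ls h
    rw [List.length_eq_zero_iff] at h; subst h
    constructor
    · simp [pvMoveA, pvPassB]
    · intro l hl
      simp [pvMoveA, pvPassB, hset, hl]
  | succ n ih =>
    intro ls h
    match ls with
    | l2 :: rest =>
      have hlen : rest.length = n := by simpa using h
      constructor
      · show pvMoveA tags none (l2 :: rest) = pvPassB tagSet (l2 :: rest)
        rw [pvMoveA]
        by_cases h2 : pvSoloA tags (PySem.Chars.strip l2) = true
        · simp only [h2, if_true]
          exact (ih rest hlen).2 l2 h2
        · rw [(ih rest hlen).1]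
          simp only [Bool.not_eq_true] at h2
          match rest with
          | [] => simp [pvPassB, h2, hset]
          | r :: rs => simp [pvPassB, h2, hset]
      · intro l hl
        rw [pvMoveA]
        by_cases h2 : pvSoloA tags (PySem.Chars.strip l2) = true
        · simp only [h2, if_true]
          rw [(ih rest hlen).2 l2 h2]
          rw [pvPassB]
          simp [hset, hl, h2]
        · simp only [Bool.not_eq_true] at h2
          rw [pvPassB]
          simp [hset, hl, h2, (ih rest hlen).1]

lemma loop_eq (tags : List String) (tagSet : PySem.Set (List Char))
    (hset : ∀ s, s ∈ tagSet ↔ pvSoloA tags s = true) :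
    ∀ fuel ls, pvRecA tags fuel ls = pvLoopB tagSet fuel ls := by
  intro fuel
  induction fuel with
  | zero => intro ls; rfl
  | succ fuel ih =>
    intro ls
    rw [pvRecA, pvLoopB]
    rw [← (pass_eq tags tagSet hset ls.length ls rfl).1]
    by_cases h : (pvMoveA tags none ls).length = ls.length
    · simp [h]
    · simp [h, ih]

-- ===== VERDICT (by name: the statement is the Claim_ definition above) =====
theorem move_solo_opening_tags_to_next_line_spec : Claim_equal_move_solo_opening_tags_to_next_line := by
  intro text tags _
  unfold Spec_move_solo_opening_tags_to_next_line
  show String.ofList (PySem.Chars.join ['\n'] (pvRecA tags _ _)) = String.ofList (PySem.Chars.join ['\n'] (pvLoopB _ _ _))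
  rw [loop_eq tags _ (fun s => solo_mem tags s)]
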